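-- pv_equiv track=rewrite | github.com/ingann/DSA-course | listsplit.py | count
-- ===== SOURCE A (Python) =====
-- def count(t):
--     smallest = min(t)
--
--     i = 0
--     scount = 0
--     indexes = {}
--     count = 0
--
--     while i < len(t):
--         if t[i] == smallest:
--             scount += 1
--             indexes[scount] = i
--             if scount > 1:
--                 count += indexes[scount]-indexes[scount-1]
--         i += 1
--
--     return count
-- ===== SOURCE B (Python) =====
-- def count(t):
--     smallest = min(t)
--     first = t.index(smallest)
--     last = len(t) - 1 - t[::-1].index(smallest)
--     return last - first
-- ===== Notes on version B (the rewrite author's own statement) =====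
-- stated objective: simpler
-- what changed: The accumulating while-loop with an occurrence dictionary telescopes away: the sum of gaps between consecutive minimum positions equals last occurrence minus first occurrence, so B just takes min, first index and last index (via the reversed list) in closed form.
import Mathlib
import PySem

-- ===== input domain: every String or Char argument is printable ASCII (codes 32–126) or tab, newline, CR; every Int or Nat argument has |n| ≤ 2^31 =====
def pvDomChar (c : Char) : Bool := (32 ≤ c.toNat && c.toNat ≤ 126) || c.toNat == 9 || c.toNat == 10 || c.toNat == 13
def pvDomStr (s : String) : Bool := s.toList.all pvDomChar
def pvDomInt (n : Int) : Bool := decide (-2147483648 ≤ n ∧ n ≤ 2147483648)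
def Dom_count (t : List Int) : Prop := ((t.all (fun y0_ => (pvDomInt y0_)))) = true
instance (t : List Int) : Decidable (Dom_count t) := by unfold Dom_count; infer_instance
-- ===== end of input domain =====

-- B replaces A's accumulating loop + occurrence dictionary by the telescoped closed form
-- (last occurrence index of the minimum) - (first occurrence index); objective: simpler.

-- ===== PORT A =====
-- one iteration of A's while-loop body; state = (scount, indexes, count)
def countStep (t : List Int) (smallest : Int) (st : Int × PySem.Dict Int Int × Int) (i : Nat) :
    Int × PySem.Dict Int Int × Int :=
  if (PySem.List.pyGet? t (i : Int)).getD 0 = smallest then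
    let scount := st.1 + 1
    let indexes := st.2.1.insert scount (i : Int)
    let cnt := if scount > 1 then st.2.2 + (indexes.getD scount 0 - indexes.getD (scount - 1) 0)
               else st.2.2
    (scount, indexes, cnt)
  else st

def count (t : List Int) : Int :=
  match PySem.List.min? t (fun y => y) with
  | none => 0   -- unreachable under Pre_count: Python's min([]) raises ValueError
  | some smallest =>
      ((List.range t.length).foldl (countStep t smallest) (0, PySem.Dict.empty, 0)).2.2

-- ===== PORT B =====
def count_alt (t : List Int) : Int :=
  match PySem.List.min? t (fun y => y) with
  | none => 0   -- unreachable under Pre_count: min([]) raises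
  | some smallest =>
      let first : Int := ((PySem.List.index? t smallest).getD 0 : Nat)
      let rev := (PySem.List.slice? t none none (-1)).getD []
      let last : Int := (t.length : Int) - 1 - ((PySem.List.index? rev smallest).getD 0 : Nat)
      last - first

-- ===== PRECONDITION & SPEC =====
-- Pre_ excludes only the empty list, on which both Pythons raise ValueError (min of empty sequence).
def Pre_count (t : List Int) : Prop := t ≠ []
instance (t : List Int) : Decidable (Pre_count t) := by unfold Pre_count; infer_instance
def pvWitness_count : List Int := [3, 1, 2, 1, 1]

def Spec_count (t : List Int) (out : Int) : Prop := out = count_alt t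
instance (t : List Int) (out : Int) : Decidable (Spec_count t out) := by unfold Spec_count; infer_instance

-- ===== CLAIM (what is proved, stated in full; the proofs are below) =====
def Claim_equal_count : Prop := ∀ (t : List Int), Dom_count t → Pre_count t → Spec_count t (count t)

-- ===== LEMMAS AND PROOFS =====

-- abbreviation for A's whole loop (proof-side only)
def loopA (t : List Int) (m : Int) : Int × PySem.Dict Int Int × Int :=
  (List.range t.length).foldl (countStep t m) (0, PySem.Dict.empty, 0)

-- first-occurrence index of m in t, as Python's t.index(m)
def fstIdx (t : List Int) (m : Int) : Int := ((PySem.List.index? t m).getD 0 : Nat)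
-- last-occurrence index of m in t, as Python's len(t)-1-t[::-1].index(m)
def lstIdx (t : List Int) (m : Int) : Int :=
  (t.length : Int) - 1 - ((PySem.List.index? t.reverse m).getD 0 : Nat)

lemma loopA_append (m : Int) (t : List Int) (x : Int) :
    loopA (t ++ [x]) m = countStep (t ++ [x]) m (loopA t m) t.length := by
  unfold loopA
  have hcongr : (List.range t.length).foldl (countStep (t ++ [x]) m) (0, PySem.Dict.empty, 0)
      = (List.range t.length).foldl (countStep t m) (0, PySem.Dict.empty, 0) := by
    apply PySem.List.foldl_congr_mem
    intro acc i hi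
    have hi' : i < t.length := List.mem_range.mp hi
    unfold countStep
    rw [show PySem.List.pyGet? (t ++ [x]) (i : Int) = PySem.List.pyGet? t (i : Int) from by
      simp [List.getElem?_append_left hi']]
  simp only [List.length_append, List.length_cons, List.length_nil, List.range_succ,
    List.foldl_append, List.foldl_cons, List.foldl_nil, hcongr]

lemma step_last_ne (m : Int) (t : List Int) (x : Int) (st : Int × PySem.Dict Int Int × Int)
    (hx : x ≠ m) : countStep (t ++ [x]) m st t.length = st := by
  unfold countStep
  simp [hx]

lemma step_last_eq (m : Int) (t : List Int) (st : Int × PySem.Dict Int Int × Int) :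
    countStep (t ++ [m]) m st t.length =
      (st.1 + 1, st.2.1.insert (st.1 + 1) (t.length : Int),
       if st.1 + 1 > 1 then st.2.2 + ((t.length : Int) - st.2.1.getD st.1 0) else st.2.2) := by
  unfold countStep
  have h1 : ((st.2.1.insert (st.1 + 1) ((t.length : Nat) : Int)).getD (st.1 + 1) 0) = (t.length : Int) := by
    simp [pysem]
  have h2 : ((st.2.1.insert (st.1 + 1) ((t.length : Nat) : Int)).getD st.1 0) = st.2.1.getD st.1 0 := by
    simp [pysem]
  simp [h1, h2]

lemma fstIdx_append_mem (m : Int) (t : List Int) (x : Int) (h : m ∈ t) :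
    fstIdx (t ++ [x]) m = fstIdx t m := by
  unfold fstIdx
  rw [PySem.List.index?_append_of_mem [x] h]

lemma fstIdx_append_self (m : Int) (t : List Int) (h : m ∉ t) :
    fstIdx (t ++ [m]) m = (t.length : Int) := by
  unfold fstIdx
  rw [PySem.List.index?_append_singleton_self t m h]
  simp

lemma lstIdx_append_self (m : Int) (t : List Int) :
    lstIdx (t ++ [m]) m = (t.length : Int) := by
  unfold lstIdx
  rw [List.reverse_append]
  simp only [List.reverse_cons, List.reverse_nil, List.nil_append, List.singleton_append]
  rw [PySem.List.index?_cons_self]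
  simp

lemma lstIdx_append_ne (m : Int) (t : List Int) (x : Int) (hx : x ≠ m) (h : m ∈ t) :
    lstIdx (t ++ [x]) m = lstIdx t m := by
  unfold lstIdx
  rw [List.reverse_append]
  obtain ⟨r, hr⟩ := Option.isSome_iff_exists.mp
    ((PySem.List.index?_isSome_iff t.reverse m).mpr (List.mem_reverse.mpr h))
  simp only [List.reverse_cons, List.reverse_nil, List.nil_append, List.singleton_append]
  rw [PySem.List.index?_cons_of_ne t.reverse hx, hr]
  simp only [Option.map_some, Option.getD_some, List.length_append, List.length_cons,
    List.length_nil]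
  push_cast
  ring

-- A's loop state after the whole while-loop, characterised by occurrence indices
lemma loop_inv (m : Int) (t : List Int) :
    ((m ∉ t → loopA t m = (0, PySem.Dict.empty, 0)) ∧
     (m ∈ t →
        (loopA t m).1 = (t.count m : Int) ∧
        (loopA t m).2.1.getD (loopA t m).1 0 = lstIdx t m ∧
        (loopA t m).2.2 = lstIdx t m - fstIdx t m)) := by
  induction t using List.reverseRecOn with
  | nil => constructor <;> simp [loopA]
  | append_singleton t x ih =>
    rw [loopA_append]
    rcases eq_or_ne x m with hxm | hxm
    · subst hxm
      rw [step_last_eq]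
      refine ⟨fun hc => absurd (by simp) hc, fun _ => ?_⟩
      rcases Decidable.em (x ∈ t) with hmt | hmt
      · obtain ⟨h1, h2, h3⟩ := ih.2 hmt
        have hc1 : 1 ≤ t.count x := List.one_le_count_iff.mpr hmt
        have hgt : (1:Int) < (loopA t x).1 + 1 := by
          rw [h1]; push_cast; omega
        refine ⟨?_, ?_, ?_⟩
        · show (loopA t x).1 + 1 = _
          rw [h1]
          simp [List.count_append]
        · show _ = lstIdx (t ++ [x]) x
          rw [lstIdx_append_self]
          simp [pysem]
        · show (if _ > 1 then _ else _) = _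
          rw [if_pos hgt, h2, h3, lstIdx_append_self, fstIdx_append_mem x t x hmt]
          ring
      · rw [ih.1 hmt]
        have hc0 : t.count x = 0 := List.count_eq_zero.mpr hmt
        refine ⟨?_, ?_, ?_⟩
        · simp [List.count_append, hc0]
        · show _ = lstIdx (t ++ [x]) x
          rw [lstIdx_append_self]
          simp [pysem]
        · rw [lstIdx_append_self, fstIdx_append_self x t hmt]
          norm_num
    · rw [step_last_ne m t x _ hxm]
      constructor
      · intro hc
        have hmt : m ∉ t := fun h => hc (by simp [h])
        exact ih.1 hmt
      · intro hmem
        have hmt : m ∈ t := by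
          rcases List.mem_append.mp hmem with h | h
          · exact h
          · simp at h; exact absurd h.symm hxm
        obtain ⟨h1, h2, h3⟩ := ih.2 hmt
        refine ⟨?_, ?_, ?_⟩
        · rw [h1]; simp [List.count_append, fun h => hxm h]
        · rw [h2, lstIdx_append_ne m t x hxm hmt]
        · rw [h3, lstIdx_append_ne m t x hxm hmt, fstIdx_append_mem m t x hmt]

theorem count_spec : Claim_equal_count := by
  intro t _ hpre
  unfold Spec_count count count_alt
  cases hmin : PySem.List.min? t (fun y => y) with
  | none => exact absurd ((PySem.List.min?_eq_none_iff t (fun y => y)).mp hmin) hpre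
  | some m =>
    have hm : m ∈ t := PySem.List.min?_mem hmin
    have h := (loop_inv m t).2 hm
    simp only [PySem.List.slice?_none_none_neg_one, Option.getD_some]
    rw [show (List.foldl (countStep t m) (0, PySem.Dict.empty, 0) (List.range t.length)) = loopA t m from rfl]
    rw [h.2.2]
    unfold lstIdx fstIdx
    ring
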